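-- pv_equiv track=rewrite | github.com/zer02dev/BimmerDaten | trc_coding.py | compare_trc_contents
-- ===== SOURCE A (Python) =====
-- from dataclasses import dataclass, field
--
-- @dataclass
-- class TrcSegment:
--     kind: str
--     option: str = ""
--     value: str = ""
--     raw_lines: list[str] = field(default_factory=list)
--     original_value: str = ""
--
-- def parse_trc_content(content: str) -> list[TrcSegment]:
--     lines = content.splitlines()
--     segments: list[TrcSegment] = []
--     index = 0
--
--     while index < len(lines):
--         current_line = lines[index]
--         if not current_line.strip():
--             segments.append(TrcSegment(kind="raw", raw_lines=[current_line]))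
--             index += 1
--             continue
--
--         if index + 1 < len(lines):
--             next_line = lines[index + 1]
--             if next_line.startswith(("\t", " ")):
--                 option = current_line.strip()
--                 value = next_line.strip()
--                 segments.append(
--                     TrcSegment(
--                         kind="option",
--                         option=option,
--                         value=value,
--                         raw_lines=[current_line, next_line],
--                         original_value=value,
--                     )
--                 )
--                 index += 2
--                 continue
--
--         segments.append(TrcSegment(kind="raw", raw_lines=[current_line]))
--         index += 1
--
--     return segments
--
-- def build_option_map(content: str) -> dict[str, str]:
--     result: dict[str, str] = {}
--     for segment in parse_trc_content(content):
--         if segment.kind == "option":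
--             result[segment.option.upper()] = segment.value
--     return result
--
-- def compare_trc_contents(content_a: str, content_b: str) -> list[tuple[str, str, str, bool]]:
--     map_a = build_option_map(content_a)
--     map_b = build_option_map(content_b)
--     ordered_keys: list[str] = []
--     seen: set[str] = set()
--
--     for key in list(map_a.keys()) + list(map_b.keys()):
--         if key not in seen:
--             seen.add(key)
--             ordered_keys.append(key)
--
--     rows: list[tuple[str, str, str, bool]] = []
--     for key in ordered_keys:
--         value_a = map_a.get(key, "")
--         value_b = map_b.get(key, "")
--         same = value_a == value_b
--         rows.append((key, value_a, value_b, same))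
--     return rows
-- ===== SOURCE B (Python) =====
-- def _option_pairs(content):
--     # Streaming state machine: carry the last candidate option line; an indented
--     # line pairs with it (and is consumed), anything else resets the candidate.
--     pending = None
--     for line in content.splitlines():
--         if line[:1] in ("\t", " ") and pending is not None:
--             yield pending.upper(), line.strip()
--             pending = None
--         else:
--             pending = line.strip() or None
--
-- def compare_trc_contents(content_a, content_b):
--     map_a = dict(_option_pairs(content_a))
--     map_b = dict(_option_pairs(content_b))
--     merged = {**map_a, **map_b}
--     return [(k, map_a.get(k, ""), map_b.get(k, ""), map_a.get(k, "") == map_b.get(k, ""))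
--             for k in merged]
-- ===== Notes on version B (the rewrite author's own statement) =====
-- stated objective: alternative
-- what changed: Replaced A's index-with-lookahead parse that builds a list of TrcSegment records and then filters it with a streaming one-state machine (a 'pending' candidate option that a later indented line pairs with and consumes) feeding a generator into dict(), and replaced the hand-rolled seen-set/ordered-keys dedup with the {**map_a, **map_b} dict merge.
import Mathlib
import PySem

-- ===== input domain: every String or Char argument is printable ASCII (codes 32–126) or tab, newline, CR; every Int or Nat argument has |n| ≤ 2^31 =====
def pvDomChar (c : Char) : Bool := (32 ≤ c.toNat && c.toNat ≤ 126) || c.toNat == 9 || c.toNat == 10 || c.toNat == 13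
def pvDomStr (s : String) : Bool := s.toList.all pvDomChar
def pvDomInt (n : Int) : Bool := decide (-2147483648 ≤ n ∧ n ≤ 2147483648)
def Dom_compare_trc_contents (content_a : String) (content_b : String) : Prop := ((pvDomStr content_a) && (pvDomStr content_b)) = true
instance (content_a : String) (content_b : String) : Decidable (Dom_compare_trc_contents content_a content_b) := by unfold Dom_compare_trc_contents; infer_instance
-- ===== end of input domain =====

-- B replaces A's index/lookahead segment-record parse with a streaming one-state machine
-- (a pending option candidate paired with a later indented line) and merges keys via {**a, **b}.

-- ===== PORT A =====
structure TrcSeg where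
  kind : String
  option : String
  value : String
  rawLines : List String
  originalValue : String
deriving Repr, DecidableEq

def rawSeg (l : String) : TrcSeg := ⟨"raw", "", "", [l], ""⟩

def parseTrcA : List String → List TrcSeg
  | [] => []
  | l :: rest =>
    if PySem.Str.strip l = "" then rawSeg l :: parseTrcA rest
    else
      match rest with
      | n :: rest2 =>
        if PySem.Str.startswith n "\t" || PySem.Str.startswith n " " then
          ⟨"option", PySem.Str.strip l, PySem.Str.strip n, [l, n], PySem.Str.strip n⟩ :: parseTrcA rest2
        else rawSeg l :: parseTrcA (n :: rest2)
      | [] => [rawSeg l]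

def optStepA (d : PySem.Dict String String) (s : TrcSeg) : PySem.Dict String String :=
  if s.kind = "option" then d.insert (PySem.Str.upper s.option) s.value else d

def buildOptionMapA (content : String) : PySem.Dict String String :=
  (parseTrcA (PySem.Str.splitlines content)).foldl optStepA PySem.Dict.empty

def compare_trc_contents (content_a : String) (content_b : String) : List (String × String × String × Bool) :=
  let ma := buildOptionMapA content_a
  let mb := buildOptionMapA content_b
  let ok := (ma.keys ++ mb.keys).foldl
    (fun (acc : PySem.Set String × List String) k =>
      if PySem.Set.contains acc.1 k then acc else (PySem.Set.add acc.1 k, acc.2 ++ [k]))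
    (PySem.Set.empty, [])
  ok.2.foldl (fun rows k =>
    let value_a := ma.getD k ""
    let value_b := mb.getD k ""
    rows ++ [(k, value_a, value_b, value_a == value_b)]) []

-- ===== PORT B =====
-- line[:1] in ("\t", " "): true iff the line's first character is a tab or a space (exact).
def indentedB (line : String) : Bool :=
  match line.toList with
  | c :: _ => c == '\t' || c == ' '
  | [] => false

-- the generator _option_pairs: fold carrying (pending, pairs emitted so far)
def pairsStepB (st : Option String × List (String × String)) (line : String) :
    Option String × List (String × String) :=
  match st.1 with
  | some p =>
    if indentedB line then (none, st.2 ++ [(PySem.Str.upper p, PySem.Str.strip line)])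
    else (if PySem.Str.strip line = "" then none else some (PySem.Str.strip line), st.2)
  | none => (if PySem.Str.strip line = "" then none else some (PySem.Str.strip line), st.2)

def optionPairsB (content : String) : List (String × String) :=
  ((PySem.Str.splitlines content).foldl pairsStepB (none, [])).2

-- dict(pairs): insert each yielded pair in order
def dictOfPairsB (pairs : List (String × String)) : PySem.Dict String String :=
  pairs.foldl (fun d p => d.insert p.1 p.2) PySem.Dict.empty

def compare_trc_contents_alt (content_a : String) (content_b : String) : List (String × String × String × Bool) :=
  let map_a := dictOfPairsB (optionPairsB content_a)
  let map_b := dictOfPairsB (optionPairsB content_b)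
  let merged := (map_a.items ++ map_b.items).foldl (fun d p => d.insert p.1 p.2) PySem.Dict.empty
  merged.keys.map (fun k =>
    (k, map_a.getD k "", map_b.getD k "", map_a.getD k "" == map_b.getD k ""))

-- ===== PRECONDITION & SPEC =====
def Spec_compare_trc_contents (content_a : String) (content_b : String) (out : List (String × String × String × Bool)) : Prop := out = compare_trc_contents_alt content_a content_b
instance (content_a : String) (content_b : String) (out : List (String × String × String × Bool)) : Decidable (Spec_compare_trc_contents content_a content_b out) := by unfold Spec_compare_trc_contents; infer_instance

-- ===== CLAIM (what is proved, stated in full; the proofs are below) =====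
def Claim_equal_compare_trc_contents : Prop := ∀ (content_a : String) (content_b : String), Dom_compare_trc_contents content_a content_b → Spec_compare_trc_contents content_a content_b (compare_trc_contents content_a content_b)

-- ===== LEMMAS AND PROOFS =====

-- the option/value pairs A's parse produces, in order
def pairsOfSegs (segs : List TrcSeg) : List (String × String) :=
  segs.filterMap (fun s => if s.kind = "option" then some (PySem.Str.upper s.option, s.value) else none)

-- A's interleaved dict inserts are the fold of its pair list.
lemma foldA_eq_pairs (segs : List TrcSeg) (d : PySem.Dict String String) :
    segs.foldl optStepA d = (pairsOfSegs segs).foldl (fun d p => d.insert p.1 p.2) d := by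
  induction segs generalizing d with
  | nil => rfl
  | cons s segs ih =>
      by_cases h : s.kind = "option" <;> simp [pairsOfSegs, optStepA, h, ih]

-- B's state machine emits exactly A's pair list, provided a pending candidate never
-- faces an already-consumed situation: whenever pending is set, the next line is unconstrained
-- only if it is where A would also pair (invariant: pending set → head line arbitrary is fine
-- because A recursed with that line at the head; we require only the stated disjunction).
-- "line[:1] in (tab, space)" is exactly startswith("\t") or startswith(" ")
lemma indentedB_eq (n : String) :
    indentedB n = (PySem.Str.startswith n "\t" || PySem.Str.startswith n " ") := by
  simp only [indentedB, PySem.Str.startswith_eq]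
  cases n.toList with
  | nil => rfl
  | cons c cs =>
      simp [PySem.Chars.startswith, List.isPrefixOf]
      cases hc : c == '\t' <;> cases hs : c == ' ' <;> simp_all [BEq.comm]

-- B's state machine emits exactly the pairs of A's parse; the invariant is that a
-- set pending candidate only ever faces a non-indented head line (A consumed the
-- indented value line together with its option line).
lemma pairs_inv (lines : List String) :
    ∀ (p : Option String) (acc : List (String × String)),
      (∀ l ls, lines = l :: ls → p.isSome → indentedB l = false) →
      (lines.foldl pairsStepB (p, acc)).2 = acc ++ pairsOfSegs (parseTrcA lines) := by
  induction lines using parseTrcA.induct with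
  | case1 => intro p acc _; simp [parseTrcA, pairsOfSegs]
  | case2 l rest hbl ih =>
      intro p acc H
      have hstep : pairsStepB (p, acc) l = (none, acc) := by
        cases p with
        | none => simp [pairsStepB, hbl]
        | some q => simp [pairsStepB, hbl, H l rest rfl rfl]
      simp only [List.foldl_cons, hstep]
      rw [ih none acc (by intro _ _ _ h; simp at h)]
      have hp : parseTrcA (l :: rest) = rawSeg l :: parseTrcA rest := by
        rw [parseTrcA.eq_def]; simp [hbl]
      simp [hp, pairsOfSegs, rawSeg]
  | case3 l hbl n rest2 hin ih =>
      intro p acc H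
      have hstep : pairsStepB (p, acc) l = (some (PySem.Str.strip l), acc) := by
        cases p with
        | none => simp [pairsStepB, hbl]
        | some q => simp [pairsStepB, hbl, H l _ rfl rfl]
      have hin' : PySem.Chars.startswith n.toList ['\t'] = true ∨ PySem.Chars.startswith n.toList [' '] = true := by
        simpa using hin
      have hstep2 : pairsStepB (some (PySem.Str.strip l), acc) n
          = (none, acc ++ [(PySem.Str.upper (PySem.Str.strip l), PySem.Str.strip n)]) := by
        rcases hin' with h | h <;> simp [pairsStepB, indentedB_eq, h]
      simp only [List.foldl_cons, hstep, hstep2]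
      rw [ih none _ (by intro _ _ _ h; simp at h)]
      have hp : parseTrcA (l :: n :: rest2)
          = ⟨"option", PySem.Str.strip l, PySem.Str.strip n, [l, n], PySem.Str.strip n⟩ :: parseTrcA rest2 := by
        rcases hin' with h | h <;> rw [parseTrcA.eq_def] <;> simp [hbl, h]
      simp [hp, pairsOfSegs]
  | case4 l hbl n rest2 hin ih =>
      intro p acc H
      have hstep : pairsStepB (p, acc) l = (some (PySem.Str.strip l), acc) := by
        cases p with
        | none => simp [pairsStepB, hbl]
        | some q => simp [pairsStepB, hbl, H l _ rfl rfl]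
      have hni : indentedB n = false := by
        rw [indentedB_eq]; simpa using hin
      have h2 : PySem.Chars.startswith n.toList ['\t'] = false ∧ PySem.Chars.startswith n.toList [' '] = false := by
        have : (PySem.Str.startswith n "\t" || PySem.Str.startswith n " ") = false := by
          simpa using hin
        simpa using this
      rw [show (l :: n :: rest2) = [l] ++ (n :: rest2) from rfl, List.foldl_append]
      rw [show List.foldl pairsStepB (p, acc) [l] = (some (PySem.Str.strip l), acc) from by
        simpa using hstep]
      rw [ih (some (PySem.Str.strip l)) acc (by intro l' ls' h' _; cases h'; exact hni)]
      have hp : parseTrcA (l :: n :: rest2) = rawSeg l :: parseTrcA (n :: rest2) := by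
        rw [parseTrcA.eq_def]; simp [hbl, h2.1, h2.2]
      simp [hp, pairsOfSegs, rawSeg]
  | case5 l hbl =>
      intro p acc H
      have hstep : pairsStepB (p, acc) l = (some (PySem.Str.strip l), acc) := by
        cases p with
        | none => simp [pairsStepB, hbl]
        | some q => simp [pairsStepB, hbl, H l _ rfl rfl]
      have hp : parseTrcA [l] = [rawSeg l] := by rw [parseTrcA.eq_def]; simp [hbl]
      simp [List.foldl_cons, hstep, hp, pairsOfSegs, rawSeg]

lemma key_loop (ks : List String) (o : PySem.Set String) :
    ks.foldl (fun (acc : PySem.Set String × List String) k =>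
        if PySem.Set.contains acc.1 k then acc else (PySem.Set.add acc.1 k, acc.2 ++ [k]))
      (o, o) = (PySem.Set.update o ks, PySem.Set.update o ks) := by
  induction ks generalizing o with
  | nil => simp [PySem.Set.update]
  | cons k ks ih =>
      have hstep : (if PySem.Set.contains o k then (o, o) else (PySem.Set.add o k, o ++ [k]))
          = (PySem.Set.add o k, PySem.Set.add o k) := by
        by_cases hm : k ∈ o <;> simp [PySem.Set.add, PySem.Set.contains, hm]
      simp only [List.foldl_cons, hstep, ih, PySem.Set.update]

-- ===== VERDICT (by name: the statement is the Claim_ definition above) =====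
-- the two option maps coincide
lemma maps_eq (content : String) :
    buildOptionMapA content = dictOfPairsB (optionPairsB content) := by
  rw [buildOptionMapA, foldA_eq_pairs, dictOfPairsB, optionPairsB,
      pairs_inv _ none [] (by intro _ _ _ h; simp at h)]
  rfl

lemma keys_merge (l : List (String × String)) (d : PySem.Dict String String) :
    (l.foldl (fun d p => d.insert p.1 p.2) d).keys = PySem.Set.update d.keys (l.map Prod.fst) :=
  PySem.Dict.keys_foldl_insert_key l Prod.fst (fun _ p => p.2) d

-- ===== VERDICT (by name: the statement is the Claim_ definition above) =====
theorem compare_trc_contents_spec : Claim_equal_compare_trc_contents := by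
  intro a b _
  show _ = _
  simp only [compare_trc_contents, compare_trc_contents_alt, maps_eq]
  rw [show (PySem.Set.empty : PySem.Set String) = ([] : List String) from rfl]
  rw [key_loop, keys_merge]
  rw [PySem.List.foldl_append_singleton_eq_map]
  simp only [PySem.Dict.keys, PySem.Set.update, List.map_append]
  rfl
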